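-- pv_equiv track=rewrite | github.com/guillermobox/ddcfg | gtkconfig.py | group_by_properties
-- ===== SOURCE A (Python) =====
-- def group_by_properties(lines):
--     section = []
--     sections = []
--     onsection = True
--
--     for line in lines:
--         if line.startswith('PROPERTY'):
--             if section:
--                 sections.append(section)
--             section = []
--         section.append(line)
--
--     sections.append(section)
--     return sections
-- ===== SOURCE B (Python) =====
-- def group_by_properties(lines):
--     cuts = [i for i, line in enumerate(lines) if line.startswith('PROPERTY')]
--     if cuts and cuts[0] == 0:
--         cuts = cuts[1:]
--     sections = []
--     start = 0
--     for cut in cuts: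
--         sections.append(lines[start:cut])
--         start = cut
--     sections.append(lines[start:])
--     return sections
-- ===== Notes on version B (the rewrite author's own statement) =====
-- stated objective: alternative
-- what changed: Replaced A's single stateful loop that accumulates the current section and flushes it at each PROPERTY marker by a two-phase decomposition: first collect the marker indices via enumerate (dropping a leading 0, since A never emits an empty leading section), then slice the input list at those cut points.
import Mathlib
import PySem

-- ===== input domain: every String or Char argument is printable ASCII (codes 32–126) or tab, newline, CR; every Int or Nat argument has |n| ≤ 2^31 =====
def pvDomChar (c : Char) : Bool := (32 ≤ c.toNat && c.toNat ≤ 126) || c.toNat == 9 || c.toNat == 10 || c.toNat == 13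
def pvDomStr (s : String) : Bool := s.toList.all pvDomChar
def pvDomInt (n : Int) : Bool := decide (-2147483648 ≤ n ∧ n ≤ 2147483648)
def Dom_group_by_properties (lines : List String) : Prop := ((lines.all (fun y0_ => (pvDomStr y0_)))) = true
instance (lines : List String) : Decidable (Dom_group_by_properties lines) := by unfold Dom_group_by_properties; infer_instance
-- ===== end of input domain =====

-- B replaces A's stateful accumulate-and-flush loop by a marker-index scan followed by
-- slicing at the cut points (objective: alternative decomposition, same cost).

-- ===== PORT A =====
-- literal transliteration of A's fold over (section, sections); the unused 'onsection' flag is dropped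
def group_by_properties (lines : List String) : List (List String) :=
  let st := lines.foldl
    (fun (p : List String × List (List String)) line =>
      if PySem.Str.startswith line "PROPERTY" then
        ([line], if p.1 = [] then p.2 else p.2 ++ [p.1])
      else
        (p.1 ++ [line], p.2))
    ([], [])
  st.2 ++ [st.1]

-- ===== PORT B =====
-- cuts = [i for i, line in enumerate(lines) if line.startswith('PROPERTY')]
def pvMarkerIndices (lines : List String) : List Int :=
  ((PySem.List.enumerate lines).filter
    (fun p => PySem.Str.startswith p.2 "PROPERTY")).map Prod.fst

-- if cuts and cuts[0] == 0: cuts = cuts[1:]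
def pvDropLeadingZero (cuts : List Int) : List Int :=
  if cuts.head? == some (0 : Int) then cuts.tail else cuts

-- the slicing loop:  for cut in cuts: sections.append(lines[start:cut]); start = cut
-- followed by  sections.append(lines[start:])
def pvRunCuts (lines : List String) (cuts : List Int) : List (List String) :=
  let st := cuts.foldl
    (fun (p : Int × List (List String)) c =>
      (c, p.2 ++ [PySem.List.slice lines (some p.1) (some c)]))
    (0, [])
  st.2 ++ [PySem.List.slice lines (some st.1) none]

def group_by_properties_alt (lines : List String) : List (List String) :=
  pvRunCuts lines (pvDropLeadingZero (pvMarkerIndices lines))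

-- ===== PRECONDITION & SPEC =====
def Spec_group_by_properties (lines : List String) (out : List (List String)) : Prop := out = group_by_properties_alt lines
instance (lines : List String) (out : List (List String)) : Decidable (Spec_group_by_properties lines out) := by unfold Spec_group_by_properties; infer_instance

-- ===== CLAIM (what is proved, stated in full; the proofs are below) =====
def Claim_equal_group_by_properties : Prop := ∀ (lines : List String), Dom_group_by_properties lines → Spec_group_by_properties lines (group_by_properties lines)

-- ===== LEMMAS AND PROOFS =====

-- marker positions of the lines, built structurally
def pvCutsI : List String → List Int
  | [] => []
  | l :: ls =>
      (if PySem.Str.startswith l "PROPERTY" then [(0 : Int)] else [])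
        ++ (pvCutsI ls).map (· + 1)

-- reference recursive form of A's loop
def pvSplit (cur : List String) : List String → List (List String)
  | [] => [cur]
  | l :: ls =>
      if PySem.Str.startswith l "PROPERTY" then
        (if cur = [] then pvSplit [l] ls else cur :: pvSplit [l] ls)
      else pvSplit (cur ++ [l]) ls

-- reference recursive form of B's slicing loop
def pvSegs (lines : List String) (s : Int) : List Int → List (List String)
  | [] => [PySem.List.slice lines (some s) none]
  | c :: cs => PySem.List.slice lines (some s) (some c) :: pvSegs lines c cs

def pvConsFirst (a : List String) : List (List String) → List (List String)
  | [] => [a]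
  | s :: r => (a ++ s) :: r

theorem pvCutsI_nonneg : ∀ (ls : List String), ∀ c ∈ pvCutsI ls, 0 ≤ c := by
  intro ls
  induction ls with
  | nil => simp [pvCutsI]
  | cons l ls ih =>
      intro c hc
      simp only [pvCutsI, List.mem_append] at hc
      rcases hc with hc | hc
      · split at hc <;> simp at hc; omega
      · simp only [List.mem_map] at hc
        obtain ⟨n, hn, rfl⟩ := hc
        have := ih n hn; omega

-- ----- A's fold equals pvSplit -----

theorem pvA_fold (ls : List String) : ∀ (sec : List String) (secs : List (List String)),
    (ls.foldl
      (fun (p : List String × List (List String)) line =>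
        if PySem.Str.startswith line "PROPERTY" then
          ([line], if p.1 = [] then p.2 else p.2 ++ [p.1])
        else (p.1 ++ [line], p.2)) (sec, secs)).2
      ++ [(ls.foldl
        (fun (p : List String × List (List String)) line =>
          if PySem.Str.startswith line "PROPERTY" then
            ([line], if p.1 = [] then p.2 else p.2 ++ [p.1])
          else (p.1 ++ [line], p.2)) (sec, secs)).1]
      = secs ++ pvSplit sec ls := by
  induction ls with
  | nil => intro sec secs; simp [pvSplit]
  | cons l ls ih =>
      intro sec secs
      rw [List.foldl_cons]
      by_cases h : PySem.Str.startswith l "PROPERTY" = true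
      · by_cases hs : sec = []
        · rw [if_pos h, if_pos hs, ih]
          simp only [pvSplit]
          rw [if_pos h, if_pos hs]
        · rw [if_pos h, if_neg hs, ih]
          simp only [pvSplit]
          rw [if_pos h, if_neg hs]
          simp
      · rw [if_neg h, ih]
        simp only [pvSplit]
        rw [if_neg h]

theorem pvA_eq_split (lines : List String) :
    group_by_properties lines = pvSplit [] lines := by
  simpa [group_by_properties] using pvA_fold lines [] []

-- ----- B's pieces -----

theorem pvMarkerIndices_gen (ls : List String) : ∀ (s : Int),
    ((PySem.List.enumerate ls s).filter
      (fun p => PySem.Str.startswith p.2 "PROPERTY")).map Prod.fst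
      = (pvCutsI ls).map (fun n => s + n) := by
  induction ls with
  | nil => intro s; simp [PySem.List.enumerate_nil, pvCutsI]
  | cons l ls ih =>
      intro s
      rw [PySem.List.enumerate_cons]
      simp only [List.filter_cons]
      by_cases h : PySem.Str.startswith l "PROPERTY" = true
      · rw [if_pos h, List.map_cons, ih (s + 1)]
        simp only [pvCutsI]
        rw [if_pos h]
        simp only [List.singleton_append, List.map_cons, List.map_map,
          Function.comp_def, add_zero]
        congr 1
        exact List.map_congr_left (fun n _ => by ring)
      · rw [if_neg h, ih (s + 1)]
        simp only [pvCutsI]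
        rw [if_neg h]
        simp only [List.nil_append, List.map_map, Function.comp_def]
        exact List.map_congr_left (fun n _ => by ring)

theorem pvMarkerIndices_eq (lines : List String) :
    pvMarkerIndices lines = pvCutsI lines := by
  have h := pvMarkerIndices_gen lines 0
  simpa [pvMarkerIndices] using h

theorem pvRunCuts_fold (lines : List String) : ∀ (cs : List Int) (s : Int) (acc : List (List String)),
    (cs.foldl
      (fun (p : Int × List (List String)) c =>
        (c, p.2 ++ [PySem.List.slice lines (some p.1) (some c)])) (s, acc)).2
      ++ [PySem.List.slice lines
        (some (cs.foldl
          (fun (p : Int × List (List String)) c =>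
            (c, p.2 ++ [PySem.List.slice lines (some p.1) (some c)])) (s, acc)).1) none]
      = acc ++ pvSegs lines s cs := by
  intro cs
  induction cs with
  | nil => intro s acc; simp [pvSegs]
  | cons c cs ih =>
      intro s acc
      rw [List.foldl_cons]
      have h := ih c (acc ++ [PySem.List.slice lines (some s) (some c)])
      simpa [pvSegs] using h

theorem pvRunCuts_eq (lines : List String) (cs : List Int) :
    pvRunCuts lines cs = pvSegs lines 0 cs := by
  simpa [pvRunCuts] using pvRunCuts_fold lines cs 0 []

-- ----- slice shift lemmas -----

theorem pvSlice_succ (l : String) (ls : List String) (s c : Int) (hs : 0 ≤ s) (hc : 0 ≤ c) :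
    PySem.List.slice (l :: ls) (some (s + 1)) (some (c + 1))
      = PySem.List.slice ls (some s) (some c) := by
  rw [PySem.List.slice_toNat _ (by omega) (by omega),
    PySem.List.slice_toNat _ hs hc]
  have h1 : (s + 1).toNat = s.toNat + 1 := by omega
  have h2 : (c + 1).toNat = c.toNat + 1 := by omega
  simp [h1, h2, Nat.succ_sub_succ]

theorem pvSlice_from_succ (l : String) (ls : List String) (s : Int) (hs : 0 ≤ s) :
    PySem.List.slice (l :: ls) (some (s + 1)) none = PySem.List.slice ls (some s) none := by
  rw [PySem.List.slice_from _ (by omega), PySem.List.slice_from _ hs]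
  have h1 : (s + 1).toNat = s.toNat + 1 := by omega
  simp [h1]

theorem pvSlice_zero_succ (l : String) (ls : List String) (c : Int) (hc : 0 ≤ c) :
    PySem.List.slice (l :: ls) (some 0) (some (c + 1))
      = l :: PySem.List.slice ls (some 0) (some c) := by
  rw [PySem.List.slice_toNat _ (by omega) (by omega),
    PySem.List.slice_toNat _ le_rfl hc]
  have h2 : (c + 1).toNat = c.toNat + 1 := by omega
  simp [h2]

theorem pvSlice_zero_zero (xs : List String) :
    PySem.List.slice xs (some (0 : Int)) (some (0 : Int)) = [] := by
  rw [PySem.List.slice_toNat _ le_rfl le_rfl]; simp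

-- ----- pvSegs shift lemmas -----

theorem pvSegs_shift (l : String) (ls : List String) :
    ∀ (cs : List Int) (s : Int), 0 ≤ s → (∀ c ∈ cs, 0 ≤ c) →
    pvSegs (l :: ls) (s + 1) (cs.map (· + 1)) = pvSegs ls s cs := by
  intro cs
  induction cs with
  | nil => intro s hs _; simp [pvSegs, pvSlice_from_succ l ls s hs]
  | cons c cs ih =>
      intro s hs hcs
      have hc : 0 ≤ c := hcs c (by simp)
      simp only [List.map_cons, pvSegs]
      rw [pvSlice_succ l ls s c hs hc, ih c hc (fun x hx => hcs x (by simp [hx]))]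

theorem pvSegs_zero_shift (l : String) (ls : List String) (cs : List Int)
    (h : ∀ c ∈ cs, 0 ≤ c) :
    pvSegs (l :: ls) 0 (cs.map (· + 1)) = pvConsFirst [l] (pvSegs ls 0 cs) := by
  cases cs with
  | nil => simp [pvSegs, pvConsFirst]
  | cons c cs =>
      have hc : 0 ≤ c := h c (by simp)
      simp only [List.map_cons, pvSegs, pvConsFirst]
      rw [pvSlice_zero_succ l ls c hc,
        pvSegs_shift l ls cs c hc (fun x hx => h x (by simp [hx]))]
      simp

theorem pvConsFirst_comp (a b : List String) (xs : List (List String)) :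
    pvConsFirst a (pvConsFirst b xs) = pvConsFirst (a ++ b) xs := by
  cases xs <;> simp [pvConsFirst]

theorem pvDropLeadingZero_map_succ (cs : List Int) (h : ∀ c ∈ cs, 0 ≤ c) :
    pvDropLeadingZero (cs.map (· + 1)) = cs.map (· + 1) := by
  cases cs with
  | nil => rfl
  | cons c r =>
      have hc : 0 ≤ c := h c (by simp)
      have hne : ¬(c + 1 = (0 : Int)) := by omega
      simp [pvDropLeadingZero, hne]

-- ----- the main correspondence -----

theorem pvSplit_eq_segs : ∀ (ls : List String) (cur : List String),
    pvSplit cur ls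
      = pvConsFirst cur (pvSegs ls 0
          (if cur = [] then pvDropLeadingZero (pvCutsI ls) else pvCutsI ls)) := by
  intro ls
  induction ls with
  | nil =>
      intro cur
      cases cur <;> simp [pvSplit, pvSegs, pvCutsI, pvDropLeadingZero, pvConsFirst]
  | cons l ls ih =>
      intro cur
      have hnn := pvCutsI_nonneg ls
      by_cases h : PySem.Str.startswith l "PROPERTY" = true
      · have hcuts : pvCutsI (l :: ls) = 0 :: (pvCutsI ls).map (· + 1) := by
          simp only [pvCutsI, if_pos h, List.singleton_append]
        have hdz : pvDropLeadingZero (0 :: (pvCutsI ls).map (· + 1))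
            = (pvCutsI ls).map (· + 1) := by simp [pvDropLeadingZero]
        have h0 : pvSegs (l :: ls) 0 (0 :: (pvCutsI ls).map (· + 1))
            = [] :: pvSegs (l :: ls) 0 ((pvCutsI ls).map (· + 1)) := by
          show PySem.List.slice (l :: ls) (some 0) (some 0) :: _ = _
          rw [pvSlice_zero_zero]
        have hIHl : pvSplit [l] ls = pvConsFirst [l] (pvSegs ls 0 (pvCutsI ls)) := by
          rw [ih [l], if_neg (by simp : ¬([l] : List String) = [])]
        by_cases hc : cur = []
        · subst hc
          rw [if_pos rfl, hcuts, hdz, pvSegs_zero_shift l ls _ hnn]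
          simp only [pvSplit]
          rw [if_pos h]
          simp only [if_true]
          rw [hIHl, pvConsFirst_comp, List.nil_append]
        · rw [if_neg hc, hcuts, h0, pvSegs_zero_shift l ls _ hnn]
          simp only [pvSplit]
          rw [if_pos h, if_neg hc, hIHl]
          simp [pvConsFirst]
      · have hcuts : pvCutsI (l :: ls) = (pvCutsI ls).map (· + 1) := by
          simp only [pvCutsI, if_neg h, List.nil_append]
        have hif : (if cur = [] then pvDropLeadingZero (pvCutsI (l :: ls))
            else pvCutsI (l :: ls)) = (pvCutsI ls).map (· + 1) := by
          rw [hcuts]; split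
          · exact pvDropLeadingZero_map_succ _ hnn
          · rfl
        simp only [pvSplit, if_neg h, hif]
        rw [pvSegs_zero_shift l ls _ hnn, ih (cur ++ [l]),
          if_neg (by simp : ¬(cur ++ [l] : List String) = []), pvConsFirst_comp]

theorem pvConsFirst_nil_segs (lines : List String) (s : Int) (cs : List Int) :
    pvConsFirst [] (pvSegs lines s cs) = pvSegs lines s cs := by
  cases cs <;> simp [pvSegs, pvConsFirst]

theorem pvAlt_eq_segs (lines : List String) :
    group_by_properties_alt lines
      = pvSegs lines 0 (pvDropLeadingZero (pvCutsI lines)) := by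
  unfold group_by_properties_alt
  rw [pvMarkerIndices_eq, pvRunCuts_eq]

-- ===== VERDICT (by name: the statement is the Claim_ definition above) =====
theorem group_by_properties_spec : Claim_equal_group_by_properties := by
  intro lines _
  unfold Spec_group_by_properties
  rw [pvA_eq_split, pvAlt_eq_segs, pvSplit_eq_segs lines [], if_pos rfl,
    pvConsFirst_nil_segs]
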